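-- pv_equiv track=rewrite | github.com/teacher-tony12138/NlpProblems | SimpleQASystem/main.py | threshold_check
-- ===== SOURCE A (Python) =====
-- def threshold_check(candidates, st_th):
--     '''
--     动态计算阈值，调节倒排表中匹配的数量
--     阈值：两个句子有多少单词相同
--     :param candidates: dict 备选问题字典
--     :param st_th: int 初始阈值
--     :return:
--             st_th: int 调节后阈值
--             num: int 调节后备选集数量
--     '''
--     # 允许进行距离计算的最大备选集数量
--     num_limit = 1000
--     values = list(candidates.values())
--     num = num_limit + 1
--     while num > num_limit:
--         st_th += 1
--         num = sum(list(map(lambda x: 1 if x >= st_th else 0, values)))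
--     return st_th, num
-- ===== SOURCE B (Python) =====
-- def threshold_check(candidates, st_th):
--     # Sort values once; the smallest passing threshold is determined by the
--     # 1001st-largest value, so no repeated counting passes are needed.
--     num_limit = 1000
--     vals = sorted(candidates.values())
--     n = len(vals)
--     t = st_th + 1
--     if n > num_limit:
--         kth = vals[n - num_limit - 1]  # 1001st largest value
--         if kth + 1 > t:
--             t = kth + 1
--     num = sum(1 for v in vals if v >= t)
--     return t, num
-- ===== Notes on version B (the rewrite author's own statement) =====
-- stated objective: alternative
-- what changed: B replaces A's while-loop that recounts the whole value list for every candidate threshold by sorting the values once and reading the smallest passing threshold off the 1001st-largest value, followed by a single counting pass.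
import Mathlib
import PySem

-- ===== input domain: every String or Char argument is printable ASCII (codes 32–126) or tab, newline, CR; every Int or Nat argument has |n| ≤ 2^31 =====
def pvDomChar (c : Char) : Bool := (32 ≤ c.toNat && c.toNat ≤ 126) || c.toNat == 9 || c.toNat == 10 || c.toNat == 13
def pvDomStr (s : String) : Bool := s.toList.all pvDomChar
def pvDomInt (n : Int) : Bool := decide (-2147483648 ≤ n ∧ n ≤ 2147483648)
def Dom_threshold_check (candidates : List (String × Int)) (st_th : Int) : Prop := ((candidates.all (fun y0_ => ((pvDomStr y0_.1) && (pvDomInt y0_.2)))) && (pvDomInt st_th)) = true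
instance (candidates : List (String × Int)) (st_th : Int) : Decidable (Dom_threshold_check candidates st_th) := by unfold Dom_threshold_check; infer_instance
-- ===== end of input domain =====

-- B replaces A's repeated counting passes (one per tried threshold) by a single sort:
-- the smallest passing threshold is read off the 1001st-largest value; objective: alternative algorithm.

-- ===== PORT A =====

-- sum(list(map(lambda x: 1 if x >= st_th else 0, values)))
def pvSumMatch (values : List Int) (st_th : Int) : Int :=
  (values.map (fun x => if x ≥ st_th then (1 : Int) else 0)).foldl (· + ·) 0

-- while num > num_limit: st_th += 1; num = sum(...)
-- (fuel makes the recursion structural; threshold_check passes enough fuel — see pvLoop_spec)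
def pvLoopA : List Int → Nat → Int → Int → Int × Int
  | _, 0, st_th, num => (st_th, num)
  | values, fuel + 1, st_th, num =>
    if 1000 < num then
      pvLoopA values fuel (st_th + 1) (pvSumMatch values (st_th + 1))
    else
      (st_th, num)

def threshold_check (candidates : List (String × Int)) (st_th : Int) : Int × Int :=
  let num_limit : Int := 1000
  let values := (PySem.Dict.ofList candidates).values
  let num : Int := num_limit + 1
  pvLoopA values ((values.foldl max 0 + 2 - st_th).toNat + 1) st_th num

-- ===== PORT B =====

def threshold_check_alt (candidates : List (String × Int)) (st_th : Int) : Int × Int :=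
  let num_limit : Int := 1000
  let vals := PySem.List.sorted ((PySem.Dict.ofList candidates).values) (fun x => x) false
  let n := vals.length
  let t : Int := st_th + 1
  let t : Int :=
    if num_limit < (n : Int) then
      let kth := vals.getD (n - 1001) 0   -- vals[n - num_limit - 1], in range since n > 1000
      if t < kth + 1 then kth + 1 else t
    else t
  let num : Int := vals.foldl (fun a v => if v ≥ t then a + 1 else a) 0
  (t, num)

-- ===== PRECONDITION & SPEC =====
def Spec_threshold_check (candidates : List (String × Int)) (st_th : Int) (out : Int × Int) : Prop := out = threshold_check_alt candidates st_th
instance (candidates : List (String × Int)) (st_th : Int) (out : Int × Int) : Decidable (Spec_threshold_check candidates st_th out) := by unfold Spec_threshold_check; infer_instance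

-- ===== CLAIM (what is proved, stated in full; the proofs are below) =====
def Claim_equal_threshold_check : Prop := ∀ (candidates : List (String × Int)) (st_th : Int), Dom_threshold_check candidates st_th → Spec_threshold_check candidates st_th (threshold_check candidates st_th)

-- ===== LEMMAS AND PROOFS =====

-- the count of values ≥ t, as an Int
def pvCount (V : List Int) (t : Int) : Int :=
  (V.countP (fun x => decide (t ≤ x)) : Int)

-- the 1001st-largest value (only meaningful when 1000 < V.length)
def pvKth (V : List Int) : Int :=
  (PySem.List.sorted V (fun x => x) false).getD (V.length - 1001) 0

-- B's threshold, as a function of the (unsorted) value list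
def pvTB (V : List Int) (st_th : Int) : Int :=
  if (1000 : Int) < (V.length : Int) then
    (if st_th + 1 < pvKth V + 1 then pvKth V + 1 else st_th + 1)
  else st_th + 1

theorem pvSumMatch_eq_count (V : List Int) (t : Int) : pvSumMatch V t = pvCount V t := by
  have key : ∀ (l : List Int) (a : Int),
      (l.map (fun x => if x ≥ t then (1 : Int) else 0)).foldl (· + ·) a
        = a + (l.countP (fun x => decide (t ≤ x)) : Int) := by
    intro l
    induction l with
    | nil => intro a; simp
    | cons y ys ih =>
      intro a
      simp only [List.map_cons, List.foldl_cons, List.countP_cons, ih]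
      by_cases hy : t ≤ y
      · simp [hy, ge_iff_le]; push_cast; ring
      · simp [hy, ge_iff_le]
  simpa [pvSumMatch, pvCount] using key V 0

theorem pvFoldlCount_eq_count (V : List Int) (t : Int) :
    V.foldl (fun a v => if v ≥ t then a + 1 else a) 0 = pvCount V t := by
  have key : ∀ (l : List Int) (a : Int),
      l.foldl (fun a v => if v ≥ t then a + 1 else a) a
        = a + (l.countP (fun x => decide (t ≤ x)) : Int) := by
    intro l
    induction l with
    | nil => intro a; simp
    | cons y ys ih =>
      intro a
      simp only [List.foldl_cons, List.countP_cons, ih]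
      by_cases hy : t ≤ y
      · simp [hy, ge_iff_le]; push_cast; ring
      · simp [hy, ge_iff_le]
  simpa [pvCount] using key V 0

theorem pvCount_sorted (V : List Int) (t : Int) :
    pvCount (PySem.List.sorted V (fun x => x) false) t = pvCount V t := by
  unfold pvCount
  exact congrArg Int.ofNat
    (List.Perm.countP_eq _ (PySem.List.sorted_perm (xs := V) (key := fun x => x) (rev := false)))

theorem pvCount_le_length (V : List Int) (t : Int) : pvCount V t ≤ (V.length : Int) := by
  unfold pvCount
  exact_mod_cast List.countP_le_length

-- the crux: with more than 1000 values, count ≤ 1000 iff the 1001st-largest value is < t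
theorem pvKeyIff (V : List Int) (t : Int) (hn : 1000 < V.length) :
    pvCount V t ≤ 1000 ↔ pvKth V < t := by
  set s := PySem.List.sorted V (fun x => x) false with hs
  have hlen : s.length = V.length := by rw [hs]; exact PySem.List.length_sorted ..
  set k : Nat := V.length - 1001 with hk
  have hkl : k < s.length := by omega
  have hkth : pvKth V = s.getD k 0 := by
    simp only [pvKth]
    rw [← hs, ← hk]
  have hcount : pvCount s t = pvCount V t := by rw [hs]; exact pvCount_sorted V t
  have hmono : ∀ (p q : Nat), p ≤ q → q < s.length → s.getD p 0 ≤ s.getD q 0 := by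
    intro p q hpq hq
    rw [hs] at hq ⊢
    rw [List.getD_eq_getElem _ 0 (by omega : p < (PySem.List.sorted V (fun x => x) false).length),
        List.getD_eq_getElem _ 0 hq]
    exact PySem.List.sorted_id_getElem_mono V hpq hq
  constructor
  · intro hle
    by_contra hlt
    push_neg at hlt
    rw [hkth] at hlt
    have hall : ∀ x ∈ s.drop k, (fun x => decide (t ≤ x)) x = true := by
      intro x hx
      rcases List.mem_iff_getElem.mp hx with ⟨j, hj, rfl⟩
      have hjl : k + j < s.length := by
        rw [List.length_drop] at hj; omega
      have e : (s.drop k)[j] = s.getD (k + j) 0 := by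
        rw [List.getElem_drop, List.getD_eq_getElem s 0 hjl]
      have hm := hmono k (k + j) (by omega) hjl
      exact decide_eq_true (by rw [e]; omega)
    have hdropc : (s.drop k).countP (fun x => decide (t ≤ x)) = (s.drop k).length :=
      List.countP_eq_length.mpr hall
    have hsplit : s.countP (fun x => decide (t ≤ x))
        = (s.take k).countP (fun x => decide (t ≤ x)) + (s.drop k).countP (fun x => decide (t ≤ x)) := by
      conv_lhs => rw [← List.take_append_drop k s]
      exact List.countP_append ..
    have hdl : (s.drop k).length = 1001 := by
      rw [List.length_drop]; omega
    have h1 : (1001 : Nat) ≤ s.countP (fun x => decide (t ≤ x)) := by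
      rw [hsplit, hdropc, hdl]; omega
    have h2 : (1001 : Int) ≤ pvCount s t := by
      unfold pvCount; exact_mod_cast h1
    omega
  · intro hlt
    rw [hkth] at hlt
    have hnone : ∀ x ∈ s.take (k + 1), (fun x => decide (t ≤ x)) x = false := by
      intro x hx
      rcases List.mem_iff_getElem.mp hx with ⟨j, hj, rfl⟩
      have hjk : j ≤ k := by
        rw [List.length_take] at hj; omega
      have e : (s.take (k + 1))[j] = s.getD j 0 := by
        rw [List.getElem_take, List.getD_eq_getElem s 0 (by omega)]
      have hm := hmono j k hjk hkl
      exact decide_eq_false (by rw [e]; omega)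
    have htakec : (s.take (k + 1)).countP (fun x => decide (t ≤ x)) = 0 :=
      List.countP_eq_zero.mpr (by intro x hx; simpa using hnone x hx)
    have hsplit : s.countP (fun x => decide (t ≤ x))
        = (s.take (k + 1)).countP (fun x => decide (t ≤ x))
          + (s.drop (k + 1)).countP (fun x => decide (t ≤ x)) := by
      conv_lhs => rw [← List.take_append_drop (k + 1) s]
      exact List.countP_append ..
    have h1 : s.countP (fun x => decide (t ≤ x)) ≤ 1000 := by
      rw [hsplit, htakec]
      have h3 := List.countP_le_length (p := fun x => decide (t ≤ x)) (l := s.drop (k + 1))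
      have hdl : (s.drop (k + 1)).length = 1000 := by
        rw [List.length_drop]; omega
      omega
    have h2 : pvCount s t ≤ 1000 := by
      unfold pvCount; exact_mod_cast h1
    omega

theorem pvTB_stable (V : List Int) (st : Int) (h : 1000 < pvCount V (st + 1)) :
    pvTB V (st + 1) = pvTB V st := by
  have hn : 1000 < V.length := by
    have := pvCount_le_length V (st + 1); omega
  have hge : st + 1 ≤ pvKth V := by
    by_contra hlt
    have := (pvKeyIff V (st + 1) hn).mpr (by omega)
    omega
  unfold pvTB
  rw [if_pos (show (1000 : Int) < (V.length : Int) by exact_mod_cast hn),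
      if_pos (show (1000 : Int) < (V.length : Int) by exact_mod_cast hn)]
  split_ifs <;> omega

theorem pvTB_stop (V : List Int) (st : Int) (h : pvCount V (st + 1) ≤ 1000) :
    pvTB V st = st + 1 := by
  unfold pvTB
  by_cases hn : (1000 : Int) < (V.length : Int)
  · have hn' : 1000 < V.length := by exact_mod_cast hn
    have hlt := (pvKeyIff V (st + 1) hn').mp h
    rw [if_pos hn, if_neg (by omega)]
  · rw [if_neg hn]

theorem pvSumMatch_le_max (values : List Int) (t : Int) (h : 0 < pvSumMatch values t) :
    t ≤ values.foldl max 0 := by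
  have key : ∀ (l : List Int) (a : Int),
      0 < (l.map (fun x => if x ≥ t then (1 : Int) else 0)).foldl (· + ·) a →
        0 < a ∨ ∃ x ∈ l, t ≤ x := by
    intro l
    induction l with
    | nil => intro a h; simp only [List.map_nil, List.foldl_nil] at h; exact Or.inl h
    | cons y ys ih =>
      intro a h
      simp only [List.map_cons, List.foldl_cons] at h
      rcases ih _ h with h' | ⟨x, hx, hxt⟩
      · by_cases hy : y ≥ t
        · exact Or.inr ⟨y, List.mem_cons_self, hy⟩
        · simp only [hy, if_false] at h'
          exact Or.inl (by omega)
      · exact Or.inr ⟨x, List.mem_cons_of_mem _ hx, hxt⟩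
  have hmax : ∀ (l : List Int) (a : Int), (∀ y ∈ l, y ≤ l.foldl max a) ∧ a ≤ l.foldl max a := by
    intro l
    induction l with
    | nil => intro a; exact ⟨by simp, le_refl _⟩
    | cons z zs ih =>
      intro a
      refine ⟨?_, ?_⟩
      · intro y hy
        rcases List.mem_cons.mp hy with rfl | hy'
        · exact le_trans (le_max_right a y) (ih (max a y)).2
        · exact (ih (max a z)).1 y hy'
      · exact le_trans (le_max_left a z) (ih (max a z)).2
  rcases key values 0 h with h' | ⟨x, hx, hxt⟩
  · omega
  · exact le_trans hxt ((hmax values 0).1 x hx)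

theorem pvLoopA_stop (V : List Int) (f : Nat) (st num : Int) (h : num ≤ 1000) :
    pvLoopA V f st num = (st, num) := by
  cases f with
  | zero => rfl
  | succ f => simp only [pvLoopA, if_neg (by omega : ¬ 1000 < num)]

theorem pvLoop_spec (V : List Int) :
    ∀ (f : Nat) (st num : Int), (V.foldl max 0 + 2 - st).toNat + 1 ≤ f → 1000 < num →
      pvLoopA V f st num = (pvTB V st, pvCount V (pvTB V st)) := by
  intro f
  induction f with
  | zero => intro st num hf hnum; omega
  | succ f ih =>
    intro st num hf hnum
    simp only [pvLoopA, if_pos hnum]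
    by_cases h2 : pvSumMatch V (st + 1) ≤ 1000
    · have hc : pvCount V (st + 1) ≤ 1000 := by rw [← pvSumMatch_eq_count]; exact h2
      rw [pvLoopA_stop V f (st + 1) _ h2, pvTB_stop V st hc, pvSumMatch_eq_count]
    · have hc : 1000 < pvCount V (st + 1) := by rw [← pvSumMatch_eq_count]; omega
      have hb : st + 1 ≤ V.foldl max 0 := pvSumMatch_le_max V (st + 1) (by omega)
      rw [ih (st + 1) (pvSumMatch V (st + 1)) (by omega) (by omega), pvTB_stable V st hc]

theorem pvAlt_eq (candidates : List (String × Int)) (st_th : Int) :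
    threshold_check_alt candidates st_th
      = (pvTB ((PySem.Dict.ofList candidates).values) st_th,
         pvCount ((PySem.Dict.ofList candidates).values)
           (pvTB ((PySem.Dict.ofList candidates).values) st_th)) := by
  unfold threshold_check_alt pvTB pvKth
  simp only [PySem.List.length_sorted]
  refine Prod.ext rfl ?_
  simp only
  rw [pvFoldlCount_eq_count, pvCount_sorted]

-- ===== VERDICT (by name: the statement is the Claim_ definition above) =====
theorem threshold_check_spec : Claim_equal_threshold_check := by
  intro candidates st_th _
  unfold Spec_threshold_check threshold_check
  rw [pvAlt_eq]
  exact pvLoop_spec ((PySem.Dict.ofList candidates).values)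
    (((PySem.Dict.ofList candidates).values.foldl max 0 + 2 - st_th).toNat + 1)
    st_th 1001 le_rfl (by omega)
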